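-- pv_equiv track=rewrite | github.com/nathanzhu144/practices | OA_2019_DRW_Q3.py | smart_elevens
-- ===== SOURCE A (Python) =====
-- def smart_elevens(power):
--     if power == 0: return 1
--     def add_strs(a, b):
--         rev_a = a[::-1]
--         rev_b = b[::-1]
--         aidx, bidx, carry, ret = 0, 0, 0, []
--
--         while aidx < len(a) or bidx < len(b) or carry != 0:
--             val1, val2 = 0, 0
--             if aidx < len(a): val1 = int(rev_a[aidx])
--             if bidx < len(b): val2 = int(rev_b[bidx])
--             tot = carry + val1 + val2
--             ret.append(tot % 10)
--             carry = tot // 10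
--             aidx += 1
--             bidx += 1
--         return ret[::-1]
--
--     curr = [1, 1]
--     for i in range(power - 1):
--         other = curr + [0]
--         curr = add_strs(curr, other)
--
--     return "".join(map(str, curr)).count("1")
-- ===== SOURCE B (Python) =====
-- def smart_elevens(power):
--     # 11^power = (10+1)^power = sum_{k=0..power} C(power,k) * 10^k (Pascal-row expansion)
--     c, p, total = 1, 1, 0
--     for k in range(power + 1):
--         total += c * p
--         c = c * (power - k) // (k + 1)
--         p *= 10
--     return str(total).count("1")
-- ===== Notes on version B (the rewrite author's own statement) =====
-- stated objective: faster
-- what changed: A multiplies a manual most-significant-first digit list by 11 power-1 times via a hand-written carry-propagating string-addition loop; B instead builds 11^power directly as the binomial expansion (10+1)^power = sum of C(power,k)*10^k with a running Pascal coefficient over native big integers, then counts '1' in str(total).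
-- outside the precondition, e.g. on smart_elevens(-1): A returns 2, B returns 0
import Mathlib
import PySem

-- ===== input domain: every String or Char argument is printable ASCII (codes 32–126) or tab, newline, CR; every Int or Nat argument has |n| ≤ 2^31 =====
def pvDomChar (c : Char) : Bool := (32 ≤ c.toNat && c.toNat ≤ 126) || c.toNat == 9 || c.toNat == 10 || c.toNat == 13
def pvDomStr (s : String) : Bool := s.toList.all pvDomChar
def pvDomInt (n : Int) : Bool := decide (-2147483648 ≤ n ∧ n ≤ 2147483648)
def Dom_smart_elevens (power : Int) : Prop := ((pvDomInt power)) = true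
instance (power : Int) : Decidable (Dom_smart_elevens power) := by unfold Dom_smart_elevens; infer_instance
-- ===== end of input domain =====

-- B replaces A's repeated shift-and-add multiply-by-11 over a manual digit list by the binomial
-- expansion 11^power = Σ C(power,k)·10^k built with a running Pascal coefficient (objective: faster).

-- ===== PORT A =====
-- A's inner while loop of add_strs, over the two reversed digit lists marching in step
-- (aidx/bidx advance together, so the remaining suffixes are the loop state).  The fuel argument
-- only makes the while loop structurally recursive; at every call site (digit lists, carry 0)
-- the loop stops after at most max(len a, len b)+1 iterations, so the fuel passed never runs out.
def addRevLoop : Nat → List Int → List Int → Int → List Int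
  | 0, _, _, _ => []
  | fuel+1, ra, rb, carry =>
    if ra.isEmpty && rb.isEmpty && carry == 0 then []
    else
      let val1 := ra.headD 0          -- int(rev_a[aidx]) if aidx < len(a) else 0
      let val2 := rb.headD 0
      let tot := carry + val1 + val2
      PySem.Int.mod tot 10 :: addRevLoop fuel ra.tail rb.tail (PySem.Int.floordiv tot 10)

def add_strs (a b : List Int) : List Int :=
  (addRevLoop (a.length + b.length + 2) a.reverse b.reverse 0).reverse

def smart_elevens (power : Int) : Int :=
  if power = 0 then 1
  else
    let curr := (PySem.List.pyRange 0 (power - 1) 1).foldl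
      (fun curr _ => add_strs curr (curr ++ [0])) [1, 1]
    ((PySem.Str.count (PySem.Str.join "" (curr.map PySem.Int.toStr)) "1" : Nat) : Int)

-- ===== PORT B =====
def smart_elevens_alt (power : Int) : Int :=
  let st := (PySem.List.pyRange 0 (power + 1) 1).foldl
    (fun (st : Int × Int × Int) k =>
      (PySem.Int.floordiv (st.1 * (power - k)) (k + 1), st.2.1 * 10, st.2.2 + st.1 * st.2.1))
    (1, 1, 0)
  ((PySem.Str.count (PySem.Int.toStr st.2.2) "1" : Nat) : Int)

-- ===== PRECONDITION & SPEC =====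
-- Pre_ restricts to the natural domain of the task (11^power for a nonnegative exponent): on a
-- negative power A returns 2, an accident of its initial state [1,1] surviving the empty loop,
-- while B returns 0 (the count of '1' in str(0)); negative exponents are outside the task's domain.
def Pre_smart_elevens (power : Int) : Prop := 0 ≤ power
instance (power : Int) : Decidable (Pre_smart_elevens power) := by unfold Pre_smart_elevens; infer_instance
def pvWitness_smart_elevens : Int := 3

def Spec_smart_elevens (power : Int) (out : Int) : Prop := out = smart_elevens_alt power
instance (power : Int) (out : Int) : Decidable (Spec_smart_elevens power out) := by unfold Spec_smart_elevens; infer_instance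

-- ===== CLAIM (what is proved, stated in full; the proofs are below) =====
def Claim_equal_smart_elevens : Prop := ∀ (power : Int), Dom_smart_elevens power → Pre_smart_elevens power → Spec_smart_elevens power (smart_elevens power)

-- ===== LEMMAS AND PROOFS =====

-- decimal digits of a natural number, least significant first, as Ints
def digitsI (n : Nat) : List Int := (Nat.digits 10 n).map (fun d : Nat => (d : Int))

theorem digitsI_pos (x : Nat) (hx : 0 < x) : digitsI x = ((x % 10 : Nat) : Int) :: digitsI (x / 10) := by
  simp [digitsI, Nat.digits_def' (by norm_num : (1:Nat) < 10) hx]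

theorem headD_digitsI (x : Nat) : (digitsI x).headD 0 = ((x % 10 : Nat) : Int) := by
  rcases Nat.eq_zero_or_pos x with h | h
  · subst h; simp [digitsI]
  · rw [digitsI_pos x h]; rfl

theorem tail_digitsI (x : Nat) : (digitsI x).tail = digitsI (x / 10) := by
  rcases Nat.eq_zero_or_pos x with h | h
  · subst h; simp [digitsI]
  · rw [digitsI_pos x h]; rfl

theorem len_digitsI_div (x : Nat) (hx : 0 < x) :
    (Nat.digits 10 x).length = (Nat.digits 10 (x / 10)).length + 1 := by
  rw [Nat.digits_def' (by norm_num : (1:Nat) < 10) hx]; rfl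

theorem addRevLoop_nil (f : Nat) : addRevLoop f [] [] 0 = [] := by
  cases f <;> simp [addRevLoop]

-- A's carry loop is schoolbook addition: on the reversed digit lists of x and y with a 0/1 carry
-- it produces exactly the reversed digit list of x + y + carry.
theorem addRevLoop_digits : ∀ (fuel x y : Nat) (c : Int), (c = 0 ∨ c = 1) →
    max (Nat.digits 10 x).length (Nat.digits 10 y).length + 2 ≤ fuel →
    addRevLoop fuel (digitsI x) (digitsI y) c = digitsI (x + y + c.toNat) := by
  intro fuel
  induction fuel with
  | zero => intro x y c _ h; omega
  | succ fuel ih =>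
    intro x y c hc hf
    by_cases hzz : x = 0 ∧ y = 0
    · obtain ⟨rfl, rfl⟩ := hzz
      rcases hc with rfl | rfl
      · simp [addRevLoop, digitsI]
      · have h1 : 1 ≤ fuel := by simpa [Nat.digits] using hf
        rw [addRevLoop]
        norm_num [digitsI]
        exact addRevLoop_nil fuel
    · -- x > 0 or y > 0
      have hpos : 0 < x + y + c.toNat := by omega
      have hcond : ¬((digitsI x).isEmpty && (digitsI y).isEmpty && c == 0) = true := by
        rcases Nat.lt_or_ge 0 x with h | h
        · rw [digitsI_pos x h]; simp
        · have hy : 0 < y := by omega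
          rw [digitsI_pos y hy]; simp
      rw [addRevLoop, if_neg hcond]
      rw [headD_digitsI, headD_digitsI, tail_digitsI, tail_digitsI]
      dsimp only
      have hx9 : x % 10 ≤ 9 := by omega
      have hy9 : y % 10 ≤ 9 := by omega
      set t : Nat := c.toNat + x % 10 + y % 10 with ht
      have htot : c + ((x % 10 : Nat) : Int) + ((y % 10 : Nat) : Int) = ((t : Nat) : Int) := by
        rcases hc with rfl | rfl <;> push_cast <;> omega
      rw [htot]
      have hmod : PySem.Int.mod ((t : Nat) : Int) 10 = ((t % 10 : Nat) : Int) := by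
        rw [PySem.Int.mod_eq_emod_of_pos (by norm_num)]; push_cast; omega
      have hdiv : PySem.Int.floordiv ((t : Nat) : Int) 10 = ((t / 10 : Nat) : Int) := by
        rw [PySem.Int.floordiv_eq_ediv_of_pos (by norm_num)]; omega
      rw [hmod, hdiv]
      have ht19 : t ≤ 19 := by rcases hc with rfl | rfl <;> omega
      have hc' : ((t / 10 : Nat) : Int) = 0 ∨ ((t / 10 : Nat) : Int) = 1 := by omega
      have k0 : (Nat.digits 10 0).length = 0 := by simp
      have hflen : max (Nat.digits 10 (x / 10)).length (Nat.digits 10 (y / 10)).length + 2 ≤ fuel := by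
        rcases Nat.eq_zero_or_pos x with hx0 | hx0 <;> rcases Nat.eq_zero_or_pos y with hy0 | hy0
        · omega
        · subst hx0; have := len_digitsI_div y hy0; simp only [Nat.zero_div]; omega
        · subst hy0; have := len_digitsI_div x hx0; simp only [Nat.zero_div]; omega
        · have h1 := len_digitsI_div x hx0; have h2 := len_digitsI_div y hy0; omega
      rw [ih (x / 10) (y / 10) _ hc' hflen]
      rw [digitsI_pos _ hpos]
      have e1 : (x + y + c.toNat) % 10 = t % 10 := by omega
      have e2 : (x + y + c.toNat) / 10 = x / 10 + y / 10 + ((t / 10 : Nat) : Int).toNat := by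
        simp only [Int.toNat_natCast]; omega
      rw [e1, e2]

-- one body iteration of A's outer loop: add_strs(curr, curr + [0]) multiplies the number by 11
theorem add_strs_mul11 (N : Nat) (hN : 0 < N) :
    add_strs (digitsI N).reverse ((digitsI N).reverse ++ [0]) = (digitsI (11 * N)).reverse := by
  have h10 : digitsI (10 * N) = 0 :: digitsI N := by
    rw [digitsI_pos _ (by omega)]
    norm_num [Nat.mul_div_cancel_left N (by norm_num : (0:Nat) < 10), Nat.mul_mod_right]
  have hrev : ((digitsI N).reverse ++ [0]).reverse = digitsI (10 * N) := by
    simp [h10]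
  unfold add_strs
  rw [hrev, List.reverse_reverse]
  rw [addRevLoop_digits _ N (10 * N) 0 (Or.inl rfl) ?_]
  · norm_num; congr 1; omega
  · have h1 := len_digitsI_div (10 * N) (by omega)
    rw [Nat.mul_div_cancel_left N (by norm_num : (0:Nat) < 10)] at h1
    have h2 : (digitsI N).length = (Nat.digits 10 N).length := by simp [digitsI]
    simp only [List.length_reverse, List.length_append, List.length_cons, List.length_nil]
    omega

theorem loopA_digits (m : Nat) :
    (PySem.List.pyRange 0 (m : Int) 1).foldl (fun curr _ => add_strs curr (curr ++ [0])) [1, 1]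
      = (digitsI (11 ^ (m + 1))).reverse := by
  induction m with
  | zero =>
    simp [PySem.List.pyRange]
    simp [digitsI]
  | succ m ih =>
    have hr : PySem.List.pyRange 0 ((m + 1 : Nat) : Int) 1 = PySem.List.pyRange 0 (m : Int) 1 ++ [(m : Int)] := by
      push_cast
      exact PySem.List.pyRange_one_succ_right (by positivity)
    rw [hr, List.foldl_append]
    simp only [List.foldl_cons, List.foldl_nil, ih]
    rw [add_strs_mul11 _ (by positivity)]
    congr 1
    congr 1
    ring

theorem toDigitsCore_eq_digits : ∀ (fuel n : Nat) (ds : List Char), 0 < n → n < 10 ^ fuel →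
    Nat.toDigitsCore 10 fuel n ds = ((Nat.digits 10 n).map Nat.digitChar).reverse ++ ds := by
  intro fuel
  induction fuel with
  | zero => intro n ds h1 h2; omega
  | succ fuel ih =>
    intro n ds h1 h2
    rw [Nat.toDigitsCore]
    by_cases hnd : n / 10 = 0
    · simp only [hnd, if_true]
      rw [Nat.digits_def' (by norm_num : (1:Nat) < 10) h1, hnd]
      simp
    · simp only [hnd, if_false]
      rw [ih (n / 10) _ (by omega) (by omega)]
      rw [Nat.digits_def' (by norm_num : (1:Nat) < 10) h1]
      simp

theorem toDigits_eq_digits (n : Nat) (hn : 0 < n) :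
    Nat.toDigits 10 n = ((Nat.digits 10 n).map Nat.digitChar).reverse := by
  rw [Nat.toDigits]
  rw [toDigitsCore_eq_digits (n + 1) n [] hn (by
    calc n < 10 ^ n := Nat.lt_pow_self (by norm_num)
    _ ≤ 10 ^ (n + 1) := Nat.pow_le_pow_right (by norm_num) (by omega))]
  simp

-- joining the single-character str(d) of each digit of N (most significant first) gives str(N)
theorem joinA_eq (N : Nat) (hN : 0 < N) :
    PySem.Str.join "" (((digitsI N).reverse).map PySem.Int.toStr) = PySem.Int.toStr (N : Int) := by
  rw [← String.toList_inj]
  have hdig : ∀ d ∈ Nat.digits 10 N, d < 10 := fun d hd => Nat.digits_lt_base (by norm_num) hd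
  have hchar : ∀ d : Nat, d < 10 → PySem.Int.toStr ((d : Nat) : Int) = String.ofList [Nat.digitChar d] := by
    intro d hd10
    rw [PySem.Int.toStr]
    congr 1
    rw [PySem.Int.toChars, if_neg (by omega)]
    simp only [Int.toNat_natCast]
    exact Nat.toDigits_of_lt_base hd10
  have hmap : ((digitsI N).reverse).map PySem.Int.toStr
      = ((Nat.digits 10 N).reverse.map Nat.digitChar).map (fun c => String.ofList [c]) := by
    rw [digitsI, ← List.map_reverse, List.map_map, List.map_map]
    apply List.map_congr_left
    intro d hd
    have hd10 : d < 10 := hdig d (List.mem_reverse.mp hd)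
    simp only [Function.comp_apply]
    exact hchar d hd10
  rw [hmap]
  rw [PySem.Str.join]
  rw [PySem.Int.toStr]
  simp only [String.toList_ofList]
  have : List.map String.toList (((Nat.digits 10 N).reverse.map Nat.digitChar).map (fun c => String.ofList [c]))
      = ((Nat.digits 10 N).reverse.map Nat.digitChar).map (fun c => [c]) := by
    simp [List.map_map, Function.comp]
  rw [this]
  have := PySem.Chars.join_nil_singletons ((Nat.digits 10 N).reverse.map Nat.digitChar)
  simp only [String.toList_empty] at *
  rw [this]
  rw [PySem.Int.toChars, if_neg (by omega)]
  simp only [Int.toNat_natCast]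
  rw [toDigits_eq_digits N hN]
  simp [List.map_reverse]

-- B's loop body, named for the invariant proof
def stepB (n : Int) (st : Int × Int × Int) (k : Int) : Int × Int × Int :=
  (PySem.Int.floordiv (st.1 * (n - k)) (k + 1), st.2.1 * 10, st.2.2 + st.1 * st.2.1)

-- B's running state after m iterations: Pascal coefficient C(n,m), power 10^m, partial binomial sum
theorem loopB_inv (n : Nat) : ∀ (m : Nat), m ≤ n + 1 →
    (PySem.List.pyRange 0 (m : Int) 1).foldl (stepB (n : Int)) (1, 1, 0)
      = (((n.choose m : Nat) : Int), (10 : Int) ^ m,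
         ∑ j ∈ Finset.range m, ((n.choose j : Nat) : Int) * 10 ^ j) := by
  intro m
  induction m with
  | zero => intro _; simp [PySem.List.pyRange]
  | succ m ih =>
    intro hm
    have hr : PySem.List.pyRange 0 ((m + 1 : Nat) : Int) 1 = PySem.List.pyRange 0 (m : Int) 1 ++ [(m : Int)] := by
      push_cast
      exact PySem.List.pyRange_one_succ_right (by positivity)
    rw [hr, List.foldl_append, ih (by omega)]
    simp only [List.foldl_cons, List.foldl_nil, stepB]
    refine Prod.ext ?_ (Prod.ext ?_ ?_)
    · -- the Pascal-coefficient update: C(n,m)·(n−m) is exactly divisible by m+1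
      show PySem.Int.floordiv (((n.choose m : Nat) : Int) * ((n : Int) - (m : Int))) ((m : Int) + 1)
          = ((n.choose (m + 1) : Nat) : Int)
      have hmn : m ≤ n := by omega
      have hsub : (n : Int) - (m : Int) = ((n - m : Nat) : Int) := by push_cast [hmn]; ring
      have hch : (n.choose m) * (n - m) = n.choose (m + 1) * (m + 1) :=
        (Nat.choose_succ_right_eq n m).symm
      rw [hsub]
      rw [PySem.Int.floordiv_eq_ediv_of_pos (by positivity)]
      have hc2 : ((n.choose m : Nat) : Int) * ((n - m : Nat) : Int)
          = ((n.choose (m + 1) : Nat) : Int) * ((m : Int) + 1) := by exact_mod_cast hch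
      rw [hc2, Int.mul_ediv_cancel _ (by omega)]
    · show (10 : Int) ^ m * 10 = (10 : Int) ^ (m + 1)
      ring
    · show (∑ j ∈ Finset.range m, ((n.choose j : Nat) : Int) * 10 ^ j) + ((n.choose m : Nat) : Int) * 10 ^ m
          = ∑ j ∈ Finset.range (m + 1), ((n.choose j : Nat) : Int) * 10 ^ j
      rw [Finset.sum_range_succ]

-- the binomial theorem: B's accumulated total is 11^n
theorem loopB_total (n : Nat) :
    ((PySem.List.pyRange 0 ((n : Int) + 1) 1).foldl (stepB (n : Int)) (1, 1, 0)).2.2 = (11 : Int) ^ n := by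
  have h1 : ((n : Int) + 1) = ((n + 1 : Nat) : Int) := by push_cast; ring
  rw [h1, loopB_inv n (n + 1) (le_refl _)]
  show (∑ j ∈ Finset.range (n + 1), ((n.choose j : Nat) : Int) * 10 ^ j) = (11 : Int) ^ n
  have h := add_pow (10 : Int) 1 n
  norm_num at h
  rw [h]
  apply Finset.sum_congr rfl
  intro j hj
  ring

theorem smart_elevens_alt_eq (power : Int) (n : Nat) (hp : power = (n : Int)) :
    smart_elevens_alt power = ((PySem.Str.count (PySem.Int.toStr ((11 : Int) ^ n)) "1" : Nat) : Int) := by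
  subst hp
  show ((PySem.Str.count (PySem.Int.toStr
    (((PySem.List.pyRange 0 ((n : Int) + 1) 1).foldl (stepB (n : Int)) (1, 1, 0)).2.2)) "1" : Nat) : Int) = _
  rw [loopB_total]

-- ===== VERDICT (by name: the statement is the Claim_ definition above) =====
theorem smart_elevens_spec : Claim_equal_smart_elevens := by
  intro power _ hpre
  unfold Spec_smart_elevens
  obtain ⟨n, rfl⟩ := Int.eq_ofNat_of_zero_le hpre
  cases n with
  | zero => decide
  | succ m =>
    rw [smart_elevens_alt_eq _ (m + 1) rfl]
    rw [smart_elevens]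
    rw [if_neg (by positivity)]
    have hm1 : ((Nat.succ m : Nat) : Int) - 1 = ((m : Nat) : Int) := by push_cast; ring
    dsimp only
    rw [hm1, loopA_digits m]
    rw [joinA_eq _ (by positivity)]
    have hcast : ((11 ^ (m + 1) : Nat) : Int) = (11 : Int) ^ (m + 1) := by push_cast; ring
    rw [hcast]
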